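-- pv_equiv track=rewrite | github.com/GeraldoRiberia/random_stuff | py/ass3.py | valleydchk
-- ===== SOURCE A (Python) =====
-- posg=0
--
-- def valleydchk(l):
--     valleyasc = False
--     valleydesc = False
--     p = 0
--     for i in range(posg,len(l)-1):
--         if(l[i+1]<l[i]):
--             valleydesc = True
--         else:
--             p= i
--             break
--     if(p != 0):
--         for i in range(p,len(l)-1):
--             if(l[i+1] > l[i]):
--                 valleyasc = True
--
--
--     if(valleyasc and valleydesc):
--         return True
--     else:
--         return False
-- ===== SOURCE B (Python) =====
-- def valleydchk(l):
--     return len(l) >= 2 and l[1] < l[0] and any(l[i + 1] > l[i] for i in range(len(l) - 1))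
-- ===== Notes on version B (the rewrite author's own statement) =====
-- stated objective: simpler
-- what changed: B eliminates A's break-driven pivot index and second loop entirely, reducing the check to one expression: length >= 2, a strictly descending first step, and any strictly ascending step anywhere in the list.
import Mathlib
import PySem

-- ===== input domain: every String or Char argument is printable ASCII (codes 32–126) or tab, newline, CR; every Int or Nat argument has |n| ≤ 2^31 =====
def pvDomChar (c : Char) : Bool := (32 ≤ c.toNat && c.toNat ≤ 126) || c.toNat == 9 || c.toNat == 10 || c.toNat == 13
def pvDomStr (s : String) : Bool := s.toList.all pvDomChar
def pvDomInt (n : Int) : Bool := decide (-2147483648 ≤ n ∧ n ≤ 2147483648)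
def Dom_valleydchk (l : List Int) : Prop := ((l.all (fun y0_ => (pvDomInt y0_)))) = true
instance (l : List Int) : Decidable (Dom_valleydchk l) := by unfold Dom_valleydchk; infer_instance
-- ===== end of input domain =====

-- B replaces A's break-driven pivot index and second loop by one expression
-- (length ≥ 2, first step descends, any ascending step anywhere): simpler, same O(n) cost.

-- ===== PORT A =====
-- first loop: for i in range(0, len(l)-1): if l[i+1] < l[i]: valleydesc = True else: p = i; break
-- (break modelled by returning; state = (valleydesc, p)); indices are always in range, so pyGetD is exact
def valleyLoop1 (l : List Int) (i stop : Int) (desc : Bool) : Bool × Int :=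
  if i < stop then
    if PySem.List.pyGetD l (i + 1) 0 < PySem.List.pyGetD l i 0 then
      valleyLoop1 l (i + 1) stop true
    else (desc, i)
  else (desc, 0)
termination_by (stop - i).toNat
decreasing_by omega

-- second loop: for i in range(p, len(l)-1): if l[i+1] > l[i]: valleyasc = True
def valleyLoop2 (l : List Int) (i stop : Int) (asc : Bool) : Bool :=
  if i < stop then
    valleyLoop2 l (i + 1) stop
      (asc || decide (PySem.List.pyGetD l i 0 < PySem.List.pyGetD l (i + 1) 0))
  else asc
termination_by (stop - i).toNat
decreasing_by omega

def valleydchk (l : List Int) : Bool :=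
  let r := valleyLoop1 l 0 ((l.length : Int) - 1) false
  let valleydesc := r.1
  let p := r.2
  let valleyasc := if p ≠ 0 then valleyLoop2 l p ((l.length : Int) - 1) false else false
  if valleyasc && valleydesc then true else false

-- ===== PORT B =====
-- len(l) >= 2 and l[1] < l[0] and any(l[i+1] > l[i] for i in range(len(l)-1))
def valleydchk_alt (l : List Int) : Bool :=
  decide (2 ≤ l.length) &&
  decide (PySem.List.pyGetD l 1 0 < PySem.List.pyGetD l 0 0) &&
  (PySem.List.pyRange 0 ((l.length : Int) - 1) 1).any
    (fun i => decide (PySem.List.pyGetD l i 0 < PySem.List.pyGetD l (i + 1) 0))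

-- ===== PRECONDITION & SPEC =====
def Spec_valleydchk (l : List Int) (out : Bool) : Prop := out = valleydchk_alt l
instance (l : List Int) (out : Bool) : Decidable (Spec_valleydchk l out) := by unfold Spec_valleydchk; infer_instance

-- ===== CLAIM (what is proved, stated in full; the proofs are below) =====
def Claim_equal_valleydchk : Prop := ∀ (l : List Int), Dom_valleydchk l → Spec_valleydchk l (valleydchk l)

-- ===== LEMMAS AND PROOFS =====

-- loop 2 is "any ascending step in [i, stop)"
theorem valleyLoop2_eq_any (l : List Int) (i stop : Int) (asc : Bool) :
    valleyLoop2 l i stop asc =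
      (asc || (PySem.List.pyRange i stop 1).any
        (fun j => decide (PySem.List.pyGetD l j 0 < PySem.List.pyGetD l (j + 1) 0))) := by
  fun_induction valleyLoop2 l i stop asc with
  | case1 i asc h ih =>
      rw [ih, PySem.List.pyRange_one_cons h, List.any_cons, Bool.or_assoc]
  | case2 i asc h =>
      rw [PySem.List.pyRange_one_eq_nil (by omega), List.any_nil, Bool.or_false]

-- loop 1 either runs off the end (all steps in [i, stop) descend, p = 0) or breaks at the
-- first non-descending index j (everything in [i, j) descends)
theorem valleyLoop1_spec (l : List Int) (i stop : Int) (desc : Bool) :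
    (valleyLoop1 l i stop desc = (desc || decide (i < stop), 0) ∧
      ∀ k, i ≤ k → k < stop → PySem.List.pyGetD l (k + 1) 0 < PySem.List.pyGetD l k 0)
    ∨ (∃ j, i ≤ j ∧ j < stop ∧
        valleyLoop1 l i stop desc = (desc || decide (i < j), j) ∧
        ¬ (PySem.List.pyGetD l (j + 1) 0 < PySem.List.pyGetD l j 0) ∧
        ∀ k, i ≤ k → k < j → PySem.List.pyGetD l (k + 1) 0 < PySem.List.pyGetD l k 0) := by
  fun_induction valleyLoop1 l i stop desc with
  | case1 i desc h hd ih =>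
      rcases ih with ⟨hr, hall⟩ | ⟨j, hj1, hj2, hr, hnd, hprev⟩
      · left
        refine ⟨?_, ?_⟩
        · rw [hr]
          simp only [Bool.true_or, Bool.or_true, decide_eq_true (show i < stop from h)]
        · intro k hk1 hk2
          rcases eq_or_lt_of_le hk1 with rfl | hk
          · exact hd
          · exact hall k (by omega) hk2
      · right
        refine ⟨j, by omega, hj2, ?_, hnd, ?_⟩
        · rw [hr]
          simp only [Bool.true_or]
          have : decide (i < j) = true := decide_eq_true (by omega)
          simp [this]
        · intro k hk1 hk2
          rcases eq_or_lt_of_le hk1 with rfl | hk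
          · exact hd
          · exact hprev k (by omega) hk2
  | case2 i desc h hd =>
      right
      refine ⟨i, le_refl i, h, ?_, hd, by omega⟩
      simp
  | case3 i desc h =>
      left
      refine ⟨?_, by omega⟩
      have : decide (i < stop) = false := decide_eq_false h
      simp [this]

-- ===== VERDICT (by name: the statement is the Claim_ definition above) =====
theorem valleydchk_spec : Claim_equal_valleydchk := by
  intro l _
  show valleydchk l = valleydchk_alt l
  unfold valleydchk valleydchk_alt
  set N : Int := (l.length : Int) - 1 with hN
  rcases valleyLoop1_spec l 0 N false with ⟨hr, hall⟩ | ⟨j, hj0, hjN, hr, hnd, hprev⟩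
  · -- no break: p = 0, A returns false; all steps descend, so B's any is false
    rw [hr]
    simp only [ne_eq, not_true_eq_false, if_false, Bool.false_and, if_neg Bool.false_ne_true]
    have hany : (PySem.List.pyRange 0 N 1).any
        (fun i => decide (PySem.List.pyGetD l i 0 < PySem.List.pyGetD l (i + 1) 0)) = false := by
      rw [List.any_eq_false]
      intro x hx
      have hb := (PySem.List.mem_pyRange_one).1 hx
      have := hall x hb.1 hb.2
      simp; omega
    rw [hany]
    simp
  · rcases eq_or_lt_of_le hj0 with rfl | hjpos
    · -- break at index 0: l[1] ≥ l[0]; both sides false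
      rw [hr]
      simp only [lt_self_iff_false, decide_false, Bool.or_false, ne_eq, not_true_eq_false,
        if_false, Bool.false_and, if_neg Bool.false_ne_true]
      have h2 : decide (PySem.List.pyGetD l 1 0 < PySem.List.pyGetD l 0 0) = false := by
        simpa using hnd
      rw [h2]
      simp
    · -- break at j ≥ 1: A = any ascending step in [j, N); earlier steps all descend
      rw [hr]
      have hdj : decide ((0:Int) < j) = true := decide_eq_true hjpos
      simp only [hdj, Bool.false_or, ne_eq]
      have hjne : j ≠ 0 := by omega
      rw [if_pos hjne, valleyLoop2_eq_any, Bool.false_or, Bool.and_true]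
      have hlen : decide (2 ≤ l.length) = true := by
        apply decide_eq_true
        omega
      have hfirst : decide (PySem.List.pyGetD l 1 0 < PySem.List.pyGetD l 0 0) = true := by
        apply decide_eq_true
        simpa using hprev 0 (le_refl 0) hjpos
      rw [hlen, hfirst]
      rw [PySem.List.pyRange_one_append 0 j N hj0 (by omega), List.any_append]
      have hfront : (PySem.List.pyRange 0 j 1).any
          (fun i => decide (PySem.List.pyGetD l i 0 < PySem.List.pyGetD l (i + 1) 0)) = false := by
        rw [List.any_eq_false]
        intro x hx
        have hb := (PySem.List.mem_pyRange_one).1 hx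
        have := hprev x hb.1 hb.2
        simp; omega
      rw [hfront, Bool.false_or, Bool.true_and, Bool.true_and]
      split <;> simp_all
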